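-- pv_equiv track=rewrite | github.com/Dujekunbrazo/GobernanzaIA | scripts/migration/bootstrap_governance.py | parse_ia_csv
-- ===== SOURCE A (Python) =====
-- IA_CHOICES = ("claude", "codex", "gemini", "roo")
--
-- def dedupe(values: list[str]) -> list[str]:
--     ordered: list[str] = []
--     seen: set[str] = set()
--     for value in values:
--         if value not in seen:
--             ordered.append(value)
--             seen.add(value)
--     return ordered
--
-- def parse_ia_csv(raw_value: str) -> list[str]:
--     raw_items = [item.strip().lower() for item in raw_value.split(",")]
--     values = [item for item in raw_items if item]
--     invalid = [item for item in values if item not in IA_CHOICES]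
--     if invalid:
--         valid_rendered = ", ".join(IA_CHOICES)
--         invalid_rendered = ", ".join(invalid)
--         raise ValueError(
--             f"Invalid IA values: {invalid_rendered}. Valid options: {valid_rendered}."
--         )
--     return dedupe(values)
-- ===== SOURCE B (Python) =====
-- IA_CHOICES = ("claude", "codex", "gemini", "roo")
--
-- def parse_ia_csv(raw_value: str) -> list[str]:
--     ordered: list[str] = []
--     seen: set[str] = set()
--     invalid: list[str] = []
--     for item in raw_value.split(","):
--         t = item.strip().lower()
--         if not t:
--             continue
--         if t not in IA_CHOICES:
--             invalid.append(t)
--         elif t not in seen: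
--             ordered.append(t)
--             seen.add(t)
--     if invalid:
--         raise ValueError(
--             f"Invalid IA values: {', '.join(invalid)}. Valid options: {', '.join(IA_CHOICES)}."
--         )
--     return ordered
-- ===== Notes on version B (the rewrite author's own statement) =====
-- stated objective: simpler
-- what changed: Fuses A's four passes (strip/lower map, empty filter, invalid filter, separate dedupe loop over a helper) into one loop over the raw tokens that validates and order-preserving-dedupes in a single traversal.
import Mathlib
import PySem

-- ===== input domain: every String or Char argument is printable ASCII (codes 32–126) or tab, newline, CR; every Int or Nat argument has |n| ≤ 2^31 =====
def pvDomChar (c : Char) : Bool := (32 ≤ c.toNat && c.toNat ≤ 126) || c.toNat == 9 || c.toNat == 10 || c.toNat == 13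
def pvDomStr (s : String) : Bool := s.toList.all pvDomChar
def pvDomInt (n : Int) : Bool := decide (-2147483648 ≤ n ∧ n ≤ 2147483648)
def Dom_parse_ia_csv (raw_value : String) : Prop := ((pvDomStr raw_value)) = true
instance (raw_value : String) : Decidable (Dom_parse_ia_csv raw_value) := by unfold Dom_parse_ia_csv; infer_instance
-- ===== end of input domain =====

-- B fuses A's four passes into one validating, order-preserving-deduping loop (objective: simpler).
-- Where Python A raises ValueError (some non-empty normalised token is not an IA choice), B raises too;
-- those inputs are outside Pre_ and both ports return [] there.

-- ===== PORT A =====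
def IA_CHOICES : List String := ["claude", "codex", "gemini", "roo"]

def dedupe (values : List String) : List String :=
  (values.foldl
    (fun (st : List String × PySem.Set String) value =>
      if st.2.contains value then st else (st.1 ++ [value], st.2.add value))
    ([], PySem.Set.empty)).1

def parse_ia_csv (raw_value : String) : List String :=
  let raw_items := ((PySem.Str.split? raw_value ",").getD []).map
    (fun item => PySem.Str.lower (PySem.Str.strip item))
  let values := raw_items.filter (fun item => !(item == ""))
  let invalid := values.filter (fun item => !(IA_CHOICES.contains item))
  if invalid.isEmpty then dedupe values else []   -- Python raises ValueError here; outside Pre_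

-- ===== PORT B =====
def parse_ia_csv_alt (raw_value : String) : List String :=
  let st := ((PySem.Str.split? raw_value ",").getD []).foldl
    (fun (st : List String × PySem.Set String × List String) item =>
      let t := PySem.Str.lower (PySem.Str.strip item)
      if t == "" then st
      else if !(IA_CHOICES.contains t) then (st.1, st.2.1, st.2.2 ++ [t])
      else if st.2.1.contains t then st
      else (st.1 ++ [t], st.2.1.add t, st.2.2))
    ([], PySem.Set.empty, [])
  if st.2.2.isEmpty then st.1 else []   -- Python raises ValueError here; outside Pre_

-- ===== PRECONDITION & SPEC =====
-- Pre_ excludes exactly the inputs on which Python A raises ValueError: some comma-separated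
-- token whose stripped, lowered form is non-empty and not one of the IA choices.
def Pre_parse_ia_csv (raw_value : String) : Prop :=
  ∀ item ∈ (PySem.Str.split? raw_value ",").getD [],
    PySem.Str.lower (PySem.Str.strip item) = "" ∨
      PySem.Str.lower (PySem.Str.strip item) ∈ IA_CHOICES
instance (raw_value : String) : Decidable (Pre_parse_ia_csv raw_value) := by
  unfold Pre_parse_ia_csv; infer_instance

def pvWitness_parse_ia_csv : String := " Claude ,codex,, roo ,claude"

def Spec_parse_ia_csv (raw_value : String) (out : List String) : Prop := out = parse_ia_csv_alt raw_value
instance (raw_value : String) (out : List String) : Decidable (Spec_parse_ia_csv raw_value out) := by unfold Spec_parse_ia_csv; infer_instance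

-- ===== CLAIM (what is proved, stated in full; the proofs are below) =====
def Claim_equal_parse_ia_csv : Prop := ∀ (raw_value : String), Dom_parse_ia_csv raw_value → Pre_parse_ia_csv raw_value → Spec_parse_ia_csv raw_value (parse_ia_csv raw_value)

-- ===== LEMMAS AND PROOFS =====

-- B's single loop, run from any state, equals A's dedupe loop over the valid tokens paired with
-- the accumulated list of invalid tokens.
set_option maxHeartbeats 1000000 in
theorem loop_eq (toks : List String) :
    ∀ (ord : List String) (seen : PySem.Set String) (inv : List String),
    toks.foldl
      (fun (st : List String × PySem.Set String × List String) item =>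
        let t := PySem.Str.lower (PySem.Str.strip item)
        if t == "" then st
        else if !(IA_CHOICES.contains t) then (st.1, st.2.1, st.2.2 ++ [t])
        else if st.2.1.contains t then st
        else (st.1 ++ [t], st.2.1.add t, st.2.2))
      (ord, seen, inv) =
    (let vals := ((toks.map (fun item => PySem.Str.lower (PySem.Str.strip item))).filter
        (fun item => !(item == ""))).filter (fun item => IA_CHOICES.contains item)
     let d := vals.foldl
        (fun (st : List String × PySem.Set String) value =>
          if st.2.contains value then st else (st.1 ++ [value], st.2.add value))
        (ord, seen)
     (d.1, d.2,
      inv ++ ((toks.map (fun item => PySem.Str.lower (PySem.Str.strip item))).filter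
        (fun item => !(item == ""))).filter (fun item => !(IA_CHOICES.contains item)))) := by
  induction toks with
  | nil => intro ord seen inv; simp
  | cons x xs ih =>
    intro ord seen inv
    have key : ∀ (S : List String × PySem.Set String × List String),
        (fun (st : List String × PySem.Set String × List String) item =>
        let t := PySem.Str.lower (PySem.Str.strip item)
        if t == "" then st
        else if !(IA_CHOICES.contains t) then (st.1, st.2.1, st.2.2 ++ [t])
        else if st.2.1.contains t then st
        else (st.1 ++ [t], st.2.1.add t, st.2.2)) (ord, seen, inv) x = S →
        List.foldl
          (fun (st : List String × PySem.Set String × List String) item =>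
        let t := PySem.Str.lower (PySem.Str.strip item)
        if t == "" then st
        else if !(IA_CHOICES.contains t) then (st.1, st.2.1, st.2.2 ++ [t])
        else if st.2.1.contains t then st
        else (st.1 ++ [t], st.2.1.add t, st.2.2))
          (ord, seen, inv) (x :: xs) =
        List.foldl
          (fun (st : List String × PySem.Set String × List String) item =>
        let t := PySem.Str.lower (PySem.Str.strip item)
        if t == "" then st
        else if !(IA_CHOICES.contains t) then (st.1, st.2.1, st.2.2 ++ [t])
        else if st.2.1.contains t then st
        else (st.1 ++ [t], st.2.1.add t, st.2.2))
          S xs := by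
      intro S hS
      subst hS
      exact List.foldl_cons
    by_cases h0 : PySem.Str.lower (PySem.Str.strip x) = ""
    · rw [key (ord, seen, inv) (by simp [h0]), ih]
      simp [h0]
    · by_cases hc : PySem.Str.lower (PySem.Str.strip x) ∈ IA_CHOICES
      · by_cases hs : PySem.Str.lower (PySem.Str.strip x) ∈ seen
        · rw [key (ord, seen, inv) (by simp [h0, hc, hs]), ih]
          simp [List.foldl_cons, h0, hc, hs]
        · rw [key (ord ++ [PySem.Str.lower (PySem.Str.strip x)],
              PySem.Set.add seen (PySem.Str.lower (PySem.Str.strip x)), inv)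
              (by simp [h0, hc, hs]), ih]
          simp [List.foldl_cons, h0, hc, hs]
      · rw [key (ord, seen, inv ++ [PySem.Str.lower (PySem.Str.strip x)]) (by simp [h0, hc]), ih]
        simp [h0, hc]

-- ===== VERDICT (by name: the statement is the Claim_ definition above) =====
theorem parse_ia_csv_spec : Claim_equal_parse_ia_csv := by
  intro raw _dom hpre
  unfold Spec_parse_ia_csv parse_ia_csv parse_ia_csv_alt dedupe
  rw [loop_eq]
  have hval : (((((PySem.Str.split? raw ",").getD []).map
      (fun item => PySem.Str.lower (PySem.Str.strip item))).filter
      (fun item => !(item == ""))).filter (fun item => IA_CHOICES.contains item)) =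
      ((((PySem.Str.split? raw ",").getD []).map
      (fun item => PySem.Str.lower (PySem.Str.strip item))).filter
      (fun item => !(item == ""))) := by
    apply List.filter_eq_self.mpr
    intro t ht
    simp only [List.mem_filter, List.mem_map] at ht
    obtain ⟨⟨item, hitem, rfl⟩, hne⟩ := ht
    rcases hpre item hitem with h | h
    · simp [h] at hne
    · simpa using h
  have hinv : (((((PySem.Str.split? raw ",").getD []).map
      (fun item => PySem.Str.lower (PySem.Str.strip item))).filter
      (fun item => !(item == ""))).filter (fun item => !(IA_CHOICES.contains item))) = [] := by
    apply List.filter_eq_nil_iff.mpr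
    intro t ht
    simp only [List.mem_filter, List.mem_map] at ht
    obtain ⟨⟨item, hitem, rfl⟩, hne⟩ := ht
    rcases hpre item hitem with h | h
    · simp [h] at hne
    · simpa using h
  simp only [hval, hinv]
  simp
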